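-- pv_equiv track=rewrite | github.com/0xAidan/golf-model | src/csv_parser.py | _find_player_column
-- ===== SOURCE A (Python) =====
-- from typing import Optional
--
-- def _find_player_column(columns: list[str]) -> Optional[str]:
--     """Find the player name column."""
--     for c in columns:
--         if c.lower() in ("playername", "player", "player name", "name"):
--             return c
--     # Check partial matches
--     for c in columns:
--         if "player" in c.lower() or "name" in c.lower():
--             return c
--     return None
-- ===== SOURCE B (Python) =====
-- from typing import Optional
--
-- _EXACT = {"playername", "player", "player name", "name"}
--
-- def _find_player_column(columns: list[str]) -> Optional[str]:
--     """Find the player name column (single pass: exact returns on sight, first partial remembered)."""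
--     partial = None
--     for c in columns:
--         low = c.lower()
--         if low in _EXACT:
--             return c
--         if partial is None and ("player" in low or "name" in low):
--             partial = c
--     return partial
-- ===== Notes on version B (the rewrite author's own statement) =====
-- stated objective: simpler
-- what changed: Replaces A's two full passes (exact-match scan then partial-match scan) with a single pass that returns an exact match on sight and remembers only the first partial match in an accumulator.
import Mathlib
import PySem

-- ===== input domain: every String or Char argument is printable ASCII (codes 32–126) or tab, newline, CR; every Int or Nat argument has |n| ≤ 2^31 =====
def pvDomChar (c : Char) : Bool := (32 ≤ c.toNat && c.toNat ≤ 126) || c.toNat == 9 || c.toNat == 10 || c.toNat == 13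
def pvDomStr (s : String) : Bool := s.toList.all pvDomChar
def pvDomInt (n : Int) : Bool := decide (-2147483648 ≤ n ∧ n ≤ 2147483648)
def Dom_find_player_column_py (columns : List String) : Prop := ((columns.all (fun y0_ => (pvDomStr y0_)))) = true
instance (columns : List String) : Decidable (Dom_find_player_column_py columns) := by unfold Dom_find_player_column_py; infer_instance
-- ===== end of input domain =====

-- B replaces A's two full scans (exact then partial) with one pass that returns an exact match immediately and keeps the first partial match in an accumulator (objective: simpler); return value is identical.


-- ===== PORT A =====
-- `for c in columns: if c.lower() in (...): return c` — first pass, exact match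
-- `for c in columns: if "player" in c.lower() or "name" in c.lower(): return c` — second pass
def pyExact (c : String) : Bool :=
  let l := PySem.Str.lower c
  l == "playername" || l == "player" || l == "player name" || l == "name"

def pyPartial (c : String) : Bool :=
  PySem.Str.isIn "player" (PySem.Str.lower c) || PySem.Str.isIn "name" (PySem.Str.lower c)

def find_player_column_py (columns : List String) : Option String :=
  match columns.find? pyExact with
  | some c => some c
  | none => columns.find? pyPartial

-- ===== PORT B =====
-- single pass with a `partial` accumulator, as in Source B
def altLoop (cols : List String) (part : Option String) : Option String :=
  match cols with
  | [] => part
  | c :: rest =>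
    let low := PySem.Str.lower c
    if ["playername", "player", "player name", "name"].contains low then some c
    else altLoop rest
      (if part.isNone && (PySem.Str.isIn "player" low || PySem.Str.isIn "name" low)
       then some c else part)

def find_player_column_py_alt (columns : List String) : Option String :=
  altLoop columns none

-- ===== PRECONDITION & SPEC =====
def Spec_find_player_column_py (columns : List String) (out : Option String) : Prop := out = find_player_column_py_alt columns
instance (columns : List String) (out : Option String) : Decidable (Spec_find_player_column_py columns out) := by unfold Spec_find_player_column_py; infer_instance

-- ===== CLAIM (what is proved, stated in full; the proofs are below) =====
def Claim_equal_find_player_column_py : Prop := ∀ (columns : List String), Dom_find_player_column_py columns → Spec_find_player_column_py columns (find_player_column_py columns)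

-- ===== LEMMAS AND PROOFS =====

-- ===== VERDICT (by name: the statement is the Claim_ definition above) =====
lemma exact_eq_contains (c : String) :
    pyExact c = ["playername", "player", "player name", "name"].contains (PySem.Str.lower c) := by
  unfold pyExact
  simp only [List.contains_cons, List.contains_nil, Bool.or_false]
  cases PySem.Str.lower c == "playername" <;>
  cases PySem.Str.lower c == "player" <;>
  cases PySem.Str.lower c == "player name" <;>
  cases PySem.Str.lower c == "name" <;> rfl

lemma altLoop_eq (cols : List String) (part : Option String) :
    altLoop cols part =
      match cols.find? pyExact with
      | some c => some c
      | none => part.orElse (fun _ => cols.find? pyPartial) := by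
  induction cols generalizing part with
  | nil => cases part <;> rfl
  | cons c rest ih =>
    have hstep : altLoop (c :: rest) part =
        if pyExact c then some c
        else altLoop rest (if part.isNone && pyPartial c then some c else part) := by
      rw [altLoop, exact_eq_contains]
      rfl
    rw [hstep]
    cases he : pyExact c with
    | true =>
      simp [List.find?, he]
    | false =>
      simp only [Bool.false_eq_true, if_neg (fun h => h), ih]
      have hf : (c :: rest).find? pyExact = rest.find? pyExact := by
        simp [List.find?, he]
      rw [hf]
      cases hr : rest.find? pyExact with
      | some x => rfl
      | none =>
        cases part with
        | some x => rfl
        | none =>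
          cases hp : pyPartial c with
          | true => simp [List.find?, hp, Option.orElse]
          | false => simp [List.find?, hp, Option.orElse]

-- ===== VERDICT =====
theorem find_player_column_py_spec : Claim_equal_find_player_column_py := by
  intro columns _
  unfold Spec_find_player_column_py find_player_column_py find_player_column_py_alt
  rw [altLoop_eq]
  cases columns.find? pyExact <;> simp [Option.orElse]
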